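-- pv_equiv track=rewrite | github.com/Jakester2000/dns_edit | dns_edit.py | get_details
-- ===== SOURCE A (Python) =====
-- def is_title(line):
-- 	return ("#" in line and "=" not in line)
--
-- def get_details(title, array):
-- 	current_title = ""
-- 	output = []
-- 	for i in range(array.index(title), len(array) - 1):
-- 		if is_title(array[i]) and array[i] != title:
-- 			break
-- 		elif array[i] != "":
-- 			output.append(array[i])
-- 	return output
-- ===== SOURCE B (Python) =====
-- def is_title(line):
-- 	return ("#" in line and "=" not in line)
--
-- def _scan(title, lines):
-- 	# structural recursion on the section: stop at the next foreign title,
-- 	# drop empty lines, build the result as the recursion unwinds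
-- 	if not lines:
-- 		return []
-- 	head, tail = lines[0], lines[1:]
-- 	if is_title(head) and head != title:
-- 		return []
-- 	rest = _scan(title, tail)
-- 	return rest if head == "" else [head] + rest
--
-- def get_details(title, array):
-- 	return _scan(title, array[array.index(title):-1])
-- ===== Notes on version B (the rewrite author's own statement) =====
-- stated objective: alternative
-- what changed: A's index loop with break and an output accumulator is replaced by slicing off the section (index + [start:-1]) and a structural recursion over that list that stops at the next foreign title and builds the filtered result while unwinding; no indices or accumulator remain.
import Mathlib
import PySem

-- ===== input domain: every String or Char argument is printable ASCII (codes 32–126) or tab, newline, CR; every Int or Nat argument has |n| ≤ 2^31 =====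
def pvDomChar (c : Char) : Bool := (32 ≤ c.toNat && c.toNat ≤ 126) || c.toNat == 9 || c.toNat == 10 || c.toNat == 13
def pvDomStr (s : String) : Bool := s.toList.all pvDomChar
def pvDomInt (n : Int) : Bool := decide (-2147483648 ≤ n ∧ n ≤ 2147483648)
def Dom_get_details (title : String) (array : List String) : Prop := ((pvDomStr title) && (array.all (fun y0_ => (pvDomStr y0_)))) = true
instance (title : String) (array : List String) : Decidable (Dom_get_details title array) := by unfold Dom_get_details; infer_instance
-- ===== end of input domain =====

-- B replaces A's index loop (break + accumulator) by slicing off the section and a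
-- structural recursion over that list (objective: alternative decomposition).

-- ===== PORT A =====
-- is_title(line)
def is_title (line : String) : Bool :=
  PySem.Str.isIn "#" line && !(PySem.Str.isIn "=" line)

-- the for-loop of A: indices i, output accumulator; break returns output
def getDetailsLoop (title : String) (array : List String) :
    List Int → List String → List String
  | [], output => output
  | i :: rest, output =>
    let x := PySem.List.pyGetD array i ""
    if is_title x && x ≠ title then output
    else if x ≠ "" then getDetailsLoop title array rest (output ++ [x])
    else getDetailsLoop title array rest output

def get_details (title : String) (array : List String) : List String :=
  match PySem.List.index? array title with
  | none => []   -- array.index raises ValueError; excluded by Pre_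
  | some idx =>
      getDetailsLoop title array
        (PySem.List.pyRange (idx : Int) ((array.length : Int) - 1) 1) []

-- ===== PORT B =====
-- Source B defines the same is_title helper; the port shares the definition above.
-- _scan(title, lines): recursion on the section list
def scanB (title : String) : List String → List String
  | [] => []
  | head :: tail =>
    if is_title head && head ≠ title then []
    else
      let rest := scanB title tail
      if head = "" then rest else head :: rest

def get_details_alt (title : String) (array : List String) : List String :=
  match PySem.List.index? array title with
  | none => []   -- array.index raises ValueError; excluded by Pre_
  | some start =>
      scanB title (PySem.List.slice array (some (start : Int)) (some (-1)))

-- ===== PRECONDITION & SPEC =====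
-- A (and B) raise ValueError via array.index when the title is absent.
def Pre_get_details (title : String) (array : List String) : Prop := title ∈ array
instance (title : String) (array : List String) : Decidable (Pre_get_details title array) := by
  unfold Pre_get_details; infer_instance

def pvWitness_get_details : String × List String :=
  ("#host", ["#host", "1.2.3.4", "", "a=b", "#other", "x"])

def Spec_get_details (title : String) (array : List String) (out : List String) : Prop :=
  out = get_details_alt title array
instance (title : String) (array : List String) (out : List String) :
    Decidable (Spec_get_details title array out) := by unfold Spec_get_details; infer_instance

-- ===== CLAIM (what is proved, stated in full; the proofs are below) =====
def Claim_equal_get_details : Prop := ∀ (title : String) (array : List String),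
  Dom_get_details title array → Pre_get_details title array →
  Spec_get_details title array (get_details title array)

-- ===== LEMMAS AND PROOFS =====

lemma slice_drop_take (xs : List String) (idx : Nat) (h : idx ≤ xs.length) :
    PySem.List.slice xs (some (idx : Int)) (some (-1))
      = (xs.drop idx).take (xs.length - 1 - idx) := by
  have hnn : ¬ ((idx : Int) < 0) := by omega
  simp [PySem.List.slice, PySem.List.clampIdx, hnn, Nat.min_eq_left h]
  by_cases h1 : xs = []
  · subst h1; simp_all
  · simp [h1]; congr 1; omega

lemma getDetailsLoop_eq (title : String) (array : List String) :
    ∀ (m j : Nat) (out : List String), j + m ≤ array.length →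
    getDetailsLoop title array (PySem.List.pyRange (j : Int) ((j : Int) + (m : Int)) 1) out
      = out ++ scanB title ((array.drop j).take m) := by
  intro m
  induction m with
  | zero =>
    intro j out _
    simp [PySem.List.pyRange, getDetailsLoop, scanB]
  | succ m ih =>
    intro j out hj
    have hjlt : j < array.length := by omega
    have hcons : array.drop j = array[j] :: array.drop (j + 1) :=
      (List.getElem_cons_drop hjlt).symm
    rw [PySem.List.pyRange_one_cons (by omega)]
    have hget : PySem.List.pyGetD array ((j : Int)) "" = array[j] := by
      simp [PySem.List.pyGetD_natCast, List.getElem?_eq_getElem hjlt]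
    rw [hcons]
    simp only [getDetailsLoop, hget, List.take_succ_cons, scanB]
    cases hX : (is_title array[j] && decide (array[j] ≠ title)) with
    | true =>
      simp
    | false =>
      simp only [Bool.false_eq_true, if_false]
      have hih := ih (j + 1) (if array[j] = "" then out else out ++ [array[j]]) (by omega)
      by_cases hemp : array[j] = ""
      · rw [if_neg (not_not_intro hemp)]
        have hih := ih (j + 1) out (by omega)
        push_cast at hih ⊢
        rw [show ((j : Int) + ((m : Int) + 1)) = (j : Int) + 1 + (m : Int) from by ring, hih]
        simp [hemp]
      · rw [if_pos hemp]
        have hih := ih (j + 1) (out ++ [array[j]]) (by omega)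
        push_cast at hih ⊢
        rw [show ((j : Int) + ((m : Int) + 1)) = (j : Int) + 1 + (m : Int) from by ring, hih]
        simp [hemp]

-- ===== VERDICT (by name: the statement is the Claim_ definition above) =====
theorem get_details_spec : Claim_equal_get_details := by
  intro title array _ hpre
  unfold Spec_get_details get_details get_details_alt
  obtain ⟨idx, hidx⟩ := (PySem.List.index?_isSome_iff array title).2 hpre |> Option.isSome_iff_exists.1
  rw [hidx]
  dsimp only
  obtain ⟨hlt, -, -⟩ := PySem.List.getElem_of_index?_eq_some hidx
  have hle : idx ≤ array.length := Nat.le_of_lt hlt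
  rw [slice_drop_take array idx hle]
  have hm : ((array.length : Int) - 1) = (idx : Int) + ((array.length - 1 - idx : Nat) : Int) ∨
      array.length - 1 - idx = 0 ∧ ((array.length : Int) - 1) ≤ (idx : Int) := by omega
  rcases hm with hm | ⟨hz, hle'⟩
  · rw [hm, getDetailsLoop_eq title array _ idx [] (by omega)]
    simp
  · have : PySem.List.pyRange (idx : Int) ((array.length : Int) - 1) 1 = [] := by
      simp [PySem.List.pyRange]
      omega
    rw [this, hz]
    simp [getDetailsLoop, scanB]
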